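-- pv_equiv track=rewrite | github.com/miliar/Code_Jam_Webscraper | solutions_python/Problem_201/1079.py | solve
-- ===== SOURCE A (Python) =====
-- def solve(N,K):
--     LI0 = {N:1}
--     LI1 = {}
--     k0=0
--     k1=0
--     while True:
--         LI1=LI0
--         k1=k0
--         LI0={}
--         for l in sorted(LI1.keys(),reverse=True):
--             if l==0:
--                 continue
--             k0 += LI1[l]
--             ma = int((l - 1) / 2)
--             mb = l - 1 - ma
--             if k0 >= K:
--                 return (" ".join(map(str, [max(ma, mb), min(ma, mb)])))
--             if ma in LI0.keys():
--                 LI0[ma] += LI1[l]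
--             else:
--                 LI0[ma] = LI1[l]
--             if mb in LI0.keys():
--                 LI0[mb] += LI1[l]
--             else:
--                 LI0[mb] = LI1[l]
-- ===== SOURCE B (Python) =====
-- def solve(N, K):
--     # People are numbered from 1; the K-th person (clamped to the first) lands at
--     # splitting depth d = K.bit_length()-1, where the N - (2**d - 1) still-free stalls
--     # split into 2**d gaps whose sizes are q and q+1.
--     i = max(K, 1)
--     d = i.bit_length() - 1
--     w = 1 << d
--     q, r = divmod(N - (w - 1), w)
--     m = (q + 1 if i - w < r else q) - 1
--     return f"{m - m // 2} {m // 2}"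
-- ===== Notes on version B (the rewrite author's own statement) =====
-- stated objective: simpler
-- what changed: A simulates the gap-splitting generation by generation in a length->count dict until the K-th person is reached; B replaces the whole simulation by a closed form: the K-th person (clamped to the first for K<1) lands at splitting depth d = K.bit_length()-1, where the N-(2^d-1) remaining stalls divide into 2^d gaps of sizes q and q+1 computed by one divmod.
import Mathlib
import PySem

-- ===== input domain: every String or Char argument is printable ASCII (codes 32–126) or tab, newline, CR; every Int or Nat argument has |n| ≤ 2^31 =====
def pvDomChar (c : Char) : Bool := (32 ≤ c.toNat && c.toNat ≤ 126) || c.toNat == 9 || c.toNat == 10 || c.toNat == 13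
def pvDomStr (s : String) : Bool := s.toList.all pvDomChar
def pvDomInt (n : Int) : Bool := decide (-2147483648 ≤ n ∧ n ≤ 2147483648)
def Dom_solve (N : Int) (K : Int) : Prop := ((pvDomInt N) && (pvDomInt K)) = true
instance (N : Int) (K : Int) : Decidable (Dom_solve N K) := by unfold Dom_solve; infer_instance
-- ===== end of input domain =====

-- B replaces A's generation-by-generation splitting simulation by a closed form: the K-th
-- person lands at splitting depth bit_length(K)-1, where the gap sizes are determined by a
-- single division (objective: simpler).

-- ===== PORT A =====
-- the for-loop over sorted(LI1.keys(), reverse=True); returns (early return?, LI0, k0).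
-- `LI1[l]` is ported as getD (every iterated key is present in LI1, so no KeyError);
-- `int((l - 1) / 2)` is float division then int(): on Dom (|l| ≤ 2^31 < 2^53) the float
-- quotient is exact, so this is exactly truncating division, PySem.Int.truncdiv.
def solveInner (K : Int) : List Int → PySem.Dict Int Int → PySem.Dict Int Int → Int →
    Option String × PySem.Dict Int Int × Int
  | [], _, LI0, k0 => (none, LI0, k0)
  | l :: rest, LI1, LI0, k0 =>
    if l = 0 then solveInner K rest LI1 LI0 k0
    else
      let k0' := k0 + LI1.getD l 0
      let ma := PySem.Int.truncdiv (l - 1) 2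
      let mb := l - 1 - ma
      if k0' ≥ K then
        (some (PySem.Int.toStr (max ma mb) ++ " " ++ PySem.Int.toStr (min ma mb)), LI0, k0')
      else
        let LI0a := if LI0.contains ma then LI0.modify ma 0 (· + LI1.getD l 0)
                    else LI0.insert ma (LI1.getD l 0)
        let LI0b := if LI0a.contains mb then LI0a.modify mb 0 (· + LI1.getD l 0)
                    else LI0a.insert mb (LI1.getD l 0)
        solveInner K rest LI1 LI0b k0'

-- the `while True` loop; fuel K.toNat + 1 is enough under Pre_ (the loop returns within
-- bit_length(K) generations there); "" is never reached on Pre_.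
def solveLoop (K : Int) : Nat → PySem.Dict Int Int → Int → String
  | 0, _, _ => ""
  | fuel+1, LI0, k0 =>
    match solveInner K (PySem.List.sorted LI0.keys (fun x => x) true) LI0 PySem.Dict.empty k0 with
    | (some s, _, _) => s
    | (none, LI0', k0') => solveLoop K fuel LI0' k0'

def solve (N : Int) (K : Int) : String :=
  solveLoop K (K.toNat + 1) (PySem.Dict.empty.insert N 1) 0

-- ===== PORT B =====
-- max(K,1) is max K 1; K.bit_length() is PySem.Int.bitLength; 1 << d is 2^d; divmod is
-- floordiv/mod; the f-string renders the two ints with str().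
def solve_alt (N : Int) (K : Int) : String :=
  let i : Int := max K 1
  let d : Nat := PySem.Int.bitLength i - 1
  let w : Int := 2 ^ d
  let q := PySem.Int.floordiv (N - (w - 1)) w
  let r := PySem.Int.mod (N - (w - 1)) w
  let m := (if i - w < r then q + 1 else q) - 1
  PySem.Int.toStr (m - PySem.Int.floordiv m 2) ++ " " ++ PySem.Int.toStr (PySem.Int.floordiv m 2)

-- ===== PRECONDITION & SPEC =====
-- Pre_ excludes exactly the inputs on which A loops forever and never returns:
-- N = 0 (all gaps are size 0 and are skipped), and 1 ≤ N < K (fewer stalls than people).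
def Pre_solve (N : Int) (K : Int) : Prop := N ≠ 0 ∧ (N < 0 ∨ K ≤ N)
instance (N : Int) (K : Int) : Decidable (Pre_solve N K) := by unfold Pre_solve; infer_instance
def pvWitness_solve : Int × Int := (5, 3)

def Spec_solve (N : Int) (K : Int) (out : String) : Prop := out = solve_alt N K
instance (N : Int) (K : Int) (out : String) : Decidable (Spec_solve N K out) := by unfold Spec_solve; infer_instance

-- ===== CLAIM (what is proved, stated in full; the proofs are below) =====
def Claim_equal_solve : Prop := ∀ (N : Int) (K : Int), Dom_solve N K → Pre_solve N K → Spec_solve N K (solve N K)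

-- ===== LEMMAS AND PROOFS =====

def Mv (n g : Nat) : Nat := n - (2^g - 1)
def qv (n g : Nat) : Nat := Mv n g / 2^g
def rv (n g : Nat) : Nat := Mv n g % 2^g
def pairStr (m : Nat) : String :=
  PySem.Int.toStr ((m : Int) - ((m/2 : Nat) : Int)) ++ " " ++ PySem.Int.toStr ((m/2 : Nat) : Int)

lemma tdiv2_natCast (m : Nat) : PySem.Int.truncdiv (m : Int) 2 = ((m/2 : Nat) : Int) := by
  simp [PySem.Int.truncdiv]

lemma bl_bounds (k : Nat) (hk : 1 ≤ k) :
    2 ^ (PySem.Int.bitLength (k:Int) - 1) ≤ k ∧ k < 2 ^ (PySem.Int.bitLength (k:Int) - 1 + 1) := by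
  have h1 := PySem.Int.two_pow_bitLength_le (k:Int) (by exact_mod_cast Nat.one_le_iff_ne_zero.mp hk)
  have h2 := PySem.Int.lt_two_pow_bitLength (k:Int)
  have hna : ((k:Int)).natAbs = k := Int.natAbs_natCast k
  rw [hna] at h1 h2
  have hbl : 1 ≤ PySem.Int.bitLength (k:Int) := by
    by_contra h
    have h0 : PySem.Int.bitLength (k:Int) = 0 := by omega
    rw [h0] at h2; simp at h2; omega
  refine ⟨h1, ?_⟩
  have heq : PySem.Int.bitLength (k:Int) - 1 + 1 = PySem.Int.bitLength (k:Int) := by omega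
  rw [heq]; exact h2

lemma alt_eq_of (n k g : Nat) (hk : 1 ≤ k) (h1 : 2^g ≤ k) (h2 : k < 2^(g+1))
    (hgn : 2^g - 1 ≤ n) (hq : k < 2^g + rv n g ∨ 1 ≤ qv n g) :
    solve_alt (n : Int) (k : Int) =
      pairStr ((if k < 2^g + rv n g then qv n g + 1 else qv n g) - 1) := by
  obtain ⟨b1, b2⟩ := bl_bounds k hk
  have hdg : PySem.Int.bitLength ((k:Nat):Int) - 1 = g := by
    by_contra hne
    rcases Nat.lt_or_ge (PySem.Int.bitLength ((k:Nat):Int) - 1) g with h | h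
    · have := Nat.pow_le_pow_right (show 1 ≤ 2 by norm_num) (show PySem.Int.bitLength ((k:Nat):Int) - 1 + 1 ≤ g from by omega)
      omega
    · have := Nat.pow_le_pow_right (show 1 ≤ 2 by norm_num) (show g + 1 ≤ PySem.Int.bitLength ((k:Nat):Int) - 1 from by omega)
      omega
  simp only [solve_alt]
  rw [show max ((k:Nat):Int) 1 = ((k:Nat):Int) from by omega]
  rw [hdg]
  have hM : (n:Int) - ((2:Int)^g - 1) = ((Mv n g : Nat) : Int) := by
    unfold Mv
    rw [Nat.cast_sub hgn, Nat.cast_sub Nat.one_le_two_pow]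
    push_cast; ring
  rw [hM, show ((2:Int)^g) = ((2^g : Nat) : Int) from by push_cast; ring]
  rw [PySem.Int.floordiv_natCast, PySem.Int.mod_natCast]
  have hqv : Mv n g / 2^g = qv n g := rfl
  have hrv : Mv n g % 2^g = rv n g := rfl
  rw [hqv, hrv]
  by_cases hc : k < 2^g + rv n g
  · rw [if_pos (show (k:Int) - ((2^g : Nat):Int) < ((rv n g : Nat):Int) from by omega), if_pos hc]
    rw [show ((qv n g : Nat) : Int) + 1 - 1 = ((qv n g + 1 - 1 : Nat) : Int) from by push_cast; ring]
    rw [show (2:Int) = ((2:Nat):Int) from rfl, PySem.Int.floordiv_natCast]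
    rfl
  · rw [if_neg (show ¬ ((k:Int) - ((2^g : Nat):Int) < ((rv n g : Nat):Int)) from by omega), if_neg hc]
    have h1q : 1 ≤ qv n g := by rcases hq with h | h; exact absurd h hc; exact h
    rw [show ((qv n g : Nat) : Int) - 1 = ((qv n g - 1 : Nat) : Int) from by rw [Nat.cast_sub h1q]; push_cast; ring]
    rw [show (2:Int) = ((2:Nat):Int) from rfl, PySem.Int.floordiv_natCast]
    rfl

lemma addAt_pos (D : PySem.Dict Int Int) (x c : Int) (h : D.contains x = true) :
    (if D.contains x then D.modify x 0 (· + c) else D.insert x c) = D.modify x 0 (· + c) := by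
  rw [h]; simp

lemma addAt_neg (D : PySem.Dict Int Int) (x c : Int) (h : D.contains x = false) :
    (if D.contains x then D.modify x 0 (· + c) else D.insert x c) = D.insert x c := by
  rw [h]; simp

lemma pair_eq (l : Int) (m : Nat) (hl : l - 1 = (m:Int)) :
    PySem.Int.toStr (max (PySem.Int.truncdiv (l-1) 2) (l - 1 - PySem.Int.truncdiv (l-1) 2))
      ++ " " ++ PySem.Int.toStr (min (PySem.Int.truncdiv (l-1) 2) (l - 1 - PySem.Int.truncdiv (l-1) 2))
    = pairStr m := by
  rw [hl, tdiv2_natCast]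
  have h1 : ((m/2 : Nat):Int) ≤ (m:Int) - ((m/2:Nat):Int) := by omega
  rw [max_eq_right h1, min_eq_left h1]; rfl

lemma qr_of (n g a b : Nat) (h : Mv n g = 2^g * a + b) (hb : b < 2^g) :
    qv n g = a ∧ rv n g = b := by
  unfold qv rv
  rw [h]
  constructor
  · rw [Nat.mul_add_div (Nat.pos_of_ne_zero (by positivity)), Nat.div_eq_of_lt hb]; omega
  · rw [Nat.mul_add_mod, Nat.mod_eq_of_lt hb]

lemma loop_ok (n k : Nat) (hk : 1 ≤ k) (hkn : k ≤ n) :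
    ∀ (fuel g : Nat) (Dg : PySem.Dict Int Int),
      2^g ≤ k →
      PySem.Int.bitLength (k:Int) - 1 - g < fuel →
      PySem.List.sorted Dg.keys (fun x => x) true
        = (if rv n g = 0 then [(qv n g : Int)] else [(qv n g : Int) + 1, (qv n g : Int)]) →
      Dg.getD ((qv n g : Int) + 1) 0 = (rv n g : Int) →
      Dg.getD ((qv n g : Int)) 0 = ((2^g : Nat) : Int) - (rv n g : Int) →
      solveLoop (k : Int) fuel Dg (((2^g : Nat) : Int) - 1) = solve_alt (n : Int) (k : Int) := by
  intro fuel
  induction fuel with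
  | zero => intro g Dg _ hfuel _ _ _; exact absurd hfuel (Nat.not_lt_zero _)
  | succ fuel ih =>
    intro g Dg hg hfuel hsk hD1 hD0
    have h2s : (2:Nat)^(g+1) = 2*2^g := by ring
    have h2pos : 1 ≤ (2:Nat)^g := Nat.one_le_two_pow
    have hMv : 2^g * qv n g + rv n g = Mv n g := Nat.div_add_mod (Mv n g) (2^g)
    have hrlt : rv n g < 2^g := Nat.mod_lt _ (by omega)
    have hMdef : Mv n g = n - (2^g - 1) := rfl
    have hMpos : 1 ≤ Mv n g := by unfold Mv; omega
    have hgn : 2^g - 1 ≤ n := le_trans (le_trans (Nat.sub_le _ _) hg) hkn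
    simp only [solveLoop, hsk]
    by_cases hret : k < 2^(g+1)
    · -- returning generation: bit_length(k)-1 = g
      by_cases hr0 : rv n g = 0
      · -- single key q, with q ≥ 1
        have hq1 : 1 ≤ qv n g := by
          rcases Nat.eq_zero_or_pos (qv n g) with h | h
          · rw [h, hr0] at hMv; simp at hMv; omega
          · exact h
        rw [if_pos hr0]
        simp only [solveInner]
        rw [if_neg (show ¬ ((qv n g : Int) = 0) from by omega)]
        rw [hD0]
        rw [if_pos (show (((2^g:Nat):Int) - 1) + (((2^g:Nat):Int) - (rv n g : Int)) ≥ (k:Int) from by omega)]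
        rw [alt_eq_of n k g hk hg hret hgn (Or.inr hq1), if_neg (show ¬ (k < 2^g + rv n g) from by omega)]
        exact pair_eq _ _ (by push_cast [Nat.cast_sub hq1]; ring)
      · rw [if_neg hr0]
        simp only [solveInner]
        rw [if_neg (show ¬ ((qv n g : Int) + 1 = 0) from by omega)]
        rw [hD1]
        by_cases hc : k ≤ 2^g - 1 + rv n g
        · rw [if_pos (show (((2^g:Nat):Int) - 1) + (rv n g : Int) ≥ (k:Int) from by omega)]
          rw [alt_eq_of n k g hk hg hret hgn (Or.inl (by omega)), if_pos (by omega)]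
          exact pair_eq _ _ (by push_cast; ring)
        · rw [if_neg (show ¬ ((((2^g:Nat):Int) - 1) + (rv n g : Int) ≥ (k:Int)) from by omega)]
          have hq1 : 1 ≤ qv n g := by
            rcases Nat.eq_zero_or_pos (qv n g) with h | h
            · exfalso; rw [h] at hMv; simp at hMv; omega
            · exact h
          rw [if_neg (show ¬ ((qv n g : Int) = 0) from by omega)]
          rw [hD0]
          rw [if_pos (show ((((2^g:Nat):Int) - 1) + (rv n g : Int)) + (((2^g:Nat):Int) - (rv n g : Int)) ≥ (k:Int) from by omega)]
          rw [alt_eq_of n k g hk hg hret hgn (Or.inr hq1), if_neg (show ¬ (k < 2^g + rv n g) from by omega)]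
          exact pair_eq _ _ (by push_cast [Nat.cast_sub hq1]; ring)
    · -- no return in this generation: k ≥ 2^(g+1)
      have hd1 : g + 1 ≤ PySem.Int.bitLength (k:Int) - 1 := by
        obtain ⟨b1, b2⟩ := bl_bounds k hk
        by_contra h
        have := Nat.pow_le_pow_right (show 1 ≤ 2 by norm_num)
          (show PySem.Int.bitLength (k:Int) - 1 + 1 ≤ g + 1 from by omega)
        omega
      have hfuel' : PySem.Int.bitLength (k:Int) - 1 - (g+1) < fuel := by omega
      have hg' : 2^(g+1) ≤ k := by omega
      have hq1 : 1 ≤ qv n g := by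
        rcases Nat.eq_zero_or_pos (qv n g) with h | h
        · exfalso; rw [h] at hMv; simp at hMv; omega
        · exact h
      have hM' : Mv n (g+1) = Mv n g - 2^g := by
        have h1 : Mv n (g+1) = n - (2^(g+1) - 1) := rfl
        omega
      by_cases hr0 : rv n g = 0
      · -- one key q; its two children halves
        rw [if_pos hr0]
        simp only [solveInner]
        rw [if_neg (show ¬ ((qv n g : Int) = 0) from by omega)]
        rw [hD0]
        rw [if_neg (show ¬ ((((2^g:Nat):Int) - 1) + (((2^g:Nat):Int) - (rv n g : Int)) ≥ (k:Int)) from by omega)]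
        change solveLoop _ _ _ _ = _
        rcases Nat.even_or_odd (qv n g) with ⟨t, ht⟩ | ⟨t, ht⟩
        · obtain ⟨u, rfl⟩ : ∃ u, t = u + 1 := ⟨t - 1, by omega⟩
          rw [show ((qv n g : Nat):Int) - 1 = ((2*u+1 : Nat):Int) from by push_cast; omega]
          rw [tdiv2_natCast]
          rw [show (2*u+1)/2 = u from by omega]
          rw [show ((2*u+1 : Nat):Int) - ((u:Nat):Int) = ((u+1:Nat):Int) from by push_cast; ring]
          obtain ⟨hq', hr'⟩ := qr_of n (g+1) u (2^g)
            (by have hx : 2^g * qv n g = 2^(g+1)*u + 2*2^g := by rw [ht, h2s]; ring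
                omega)
            (by omega)
          have hne : (((u+1:Nat):Int) = ((u:Nat):Int)) = False := by simp
          rw [addAt_neg _ _ _ (PySem.Dict.contains_empty _)]
          rw [addAt_neg _ _ _ (by rw [PySem.Dict.contains_insert, PySem.Dict.contains_empty]
                                  simp)]
          convert ih (g+1) _ hg' hfuel' ?_ ?_ ?_ using 2
          · push_cast; omega
          · rw [hq', hr', if_neg (show ¬ (2:Nat)^g = 0 from by omega)]
            rw [PySem.Dict.keys_insert_of_not_contains _ _
                  (by rw [PySem.Dict.contains_insert, PySem.Dict.contains_empty]; simp)]
            rw [PySem.Dict.keys_insert_of_not_contains _ _ (PySem.Dict.contains_empty _)]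
            rw [PySem.Dict.keys_empty]
            simp only [List.nil_append]
            rw [show ((u:Nat):Int) + 1 = ((u+1:Nat):Int) from by push_cast; ring]
            exact PySem.List.sorted_rev_eq_of_perm_of_pairwise_gt _ _ _
              (List.Perm.swap _ _ _) (by simp)
          · rw [hq', hr']
            rw [show ((u:Nat):Int) + 1 = ((u+1:Nat):Int) from by push_cast; ring]
            rw [PySem.Dict.getD_insert, if_pos rfl]
            omega
          · rw [hq', hr']
            rw [PySem.Dict.getD_insert, if_neg (show ¬ (((u:Nat):Int) = ((u+1:Nat):Int)) from by simp)]
            rw [PySem.Dict.getD_insert, if_pos rfl]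
            omega
        · -- q = 2t+1: both children are t
          rw [show ((qv n g : Nat):Int) - 1 = ((2*t : Nat):Int) from by push_cast; omega]
          rw [tdiv2_natCast]
          rw [show (2*t)/2 = t from by omega]
          rw [show ((2*t : Nat):Int) - ((t:Nat):Int) = ((t:Nat):Int) from by push_cast; ring]
          obtain ⟨hq', hr'⟩ := qr_of n (g+1) t 0
            (by have hx : 2^g * qv n g = 2^(g+1)*t + 2^g := by rw [ht, h2s]; ring
                omega)
            (by omega)
          rw [addAt_neg _ _ _ (PySem.Dict.contains_empty _)]
          rw [addAt_pos _ _ _ (PySem.Dict.contains_insert_self _ _ _)]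
          convert ih (g+1) _ hg' hfuel' ?_ ?_ ?_ using 2
          · push_cast; omega
          · rw [hq', hr', if_pos rfl]
            rw [PySem.Dict.keys_modify,
                PySem.Dict.keys_insert_of_contains _ _ (PySem.Dict.contains_insert_self _ _ _),
                PySem.Dict.keys_insert_of_not_contains _ _ (PySem.Dict.contains_empty _),
                PySem.Dict.keys_empty]
            exact PySem.List.sorted_rev_eq_self_of_pairwise _ _ (by simp)
          · rw [hq', hr']
            rw [PySem.Dict.getD_modify, if_neg (show ¬ (((t:Nat):Int) + 1 = ((t:Nat):Int)) from by omega)]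
            rw [PySem.Dict.getD_insert, if_neg (show ¬ (((t:Nat):Int) + 1 = ((t:Nat):Int)) from by omega)]
            rw [PySem.Dict.getD_empty]
            omega
          · rw [hq', hr']
            rw [PySem.Dict.getD_modify, if_pos rfl]
            beta_reduce
            rw [PySem.Dict.getD_insert, if_pos rfl]
            omega
      · -- two keys q+1 and q; no return at either
        rw [if_neg hr0]
        simp only [solveInner]
        rw [if_neg (show ¬ ((qv n g : Int) + 1 = 0) from by omega)]
        rw [hD1]
        rw [if_neg (show ¬ ((((2^g:Nat):Int) - 1) + (rv n g : Int) ≥ (k:Int)) from by omega)]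
        rw [if_neg (show ¬ ((qv n g : Int) = 0) from by omega)]
        rw [hD0]
        rw [if_neg (show ¬ (((((2^g:Nat):Int) - 1) + (rv n g : Int)) + (((2^g:Nat):Int) - (rv n g : Int)) ≥ (k:Int)) from by omega)]
        change solveLoop _ _ _ _ = _
        rcases Nat.even_or_odd (qv n g) with ⟨t, ht⟩ | ⟨t, ht⟩
        · obtain ⟨u, rfl⟩ : ∃ u, t = u + 1 := ⟨t - 1, by omega⟩
          rw [show ((qv n g : Nat):Int) + 1 - 1 = ((2*u+2 : Nat):Int) from by push_cast; omega]
          rw [show ((qv n g : Nat):Int) - 1 = ((2*u+1 : Nat):Int) from by push_cast; omega]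
          rw [tdiv2_natCast, tdiv2_natCast]
          rw [show (2*u+2)/2 = u+1 from by omega, show (2*u+1)/2 = u from by omega]
          rw [show ((2*u+2 : Nat):Int) - ((u+1:Nat):Int) = ((u+1:Nat):Int) from by push_cast; ring]
          rw [show ((2*u+1 : Nat):Int) - ((u:Nat):Int) = ((u+1:Nat):Int) from by push_cast; ring]
          obtain ⟨hq', hr'⟩ := qr_of n (g+1) u (2^g + rv n g)
            (by have hx : 2^g * qv n g = 2^(g+1)*u + 2*2^g := by rw [ht, h2s]; ring
                omega)
            (by omega)
          rw [addAt_pos _ _ _ (by simp [PySem.Dict.contains_modify, PySem.Dict.contains_insert, PySem.Dict.contains_insert_self, PySem.Dict.contains_empty])]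
          rw [addAt_neg _ _ _ (by simp [PySem.Dict.contains_modify, PySem.Dict.contains_insert, PySem.Dict.contains_insert_self, PySem.Dict.contains_empty])]
          rw [addAt_pos _ _ _ (by simp [PySem.Dict.contains_modify, PySem.Dict.contains_insert, PySem.Dict.contains_insert_self, PySem.Dict.contains_empty])]
          rw [addAt_neg _ _ _ (PySem.Dict.contains_empty _)]
          convert ih (g+1) _ hg' hfuel' ?_ ?_ ?_ using 2
          · push_cast; omega
          · rw [hq', hr', if_neg (show ¬ (2^g + rv n g = 0) from by omega)]
            rw [PySem.Dict.keys_modify,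
                PySem.Dict.keys_insert_of_contains _ _ (by
                  simp [PySem.Dict.contains_insert, PySem.Dict.contains_modify, PySem.Dict.contains_insert_self]),
                PySem.Dict.keys_insert_of_not_contains _ _ (by
                  simp [PySem.Dict.contains_modify, PySem.Dict.contains_insert, PySem.Dict.contains_empty]),
                PySem.Dict.keys_modify,
                PySem.Dict.keys_insert_of_contains _ _ (PySem.Dict.contains_insert_self _ _ _),
                PySem.Dict.keys_insert_of_not_contains _ _ (PySem.Dict.contains_empty _),
                PySem.Dict.keys_empty]
            simp only [List.nil_append]
            rw [show ((u:Nat):Int) + 1 = ((u+1:Nat):Int) from by push_cast; ring]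
            exact PySem.List.sorted_rev_eq_self_of_pairwise _ _ (by simp)
          · rw [hq', hr']
            rw [show ((u:Nat):Int) + 1 = ((u+1:Nat):Int) from by push_cast; ring]
            rw [PySem.Dict.getD_modify, if_pos rfl]
            beta_reduce
            rw [PySem.Dict.getD_insert, if_neg (show ¬ (((u+1:Nat):Int) = ((u:Nat):Int)) from by simp)]
            rw [PySem.Dict.getD_modify, if_pos rfl]
            beta_reduce
            rw [PySem.Dict.getD_insert, if_pos rfl]
            push_cast; omega
          · rw [hq', hr']
            rw [PySem.Dict.getD_modify, if_neg (show ¬ (((u:Nat):Int) = ((u+1:Nat):Int)) from by simp)]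
            rw [PySem.Dict.getD_insert, if_pos rfl]
            push_cast; omega
        · rw [show ((qv n g : Nat):Int) + 1 - 1 = ((2*t+1 : Nat):Int) from by push_cast; omega]
          rw [show ((qv n g : Nat):Int) - 1 = ((2*t : Nat):Int) from by push_cast; omega]
          rw [tdiv2_natCast, tdiv2_natCast]
          rw [show (2*t+1)/2 = t from by omega, show (2*t)/2 = t from by omega]
          rw [show ((2*t+1 : Nat):Int) - ((t:Nat):Int) = ((t+1:Nat):Int) from by push_cast; ring]
          rw [show ((2*t : Nat):Int) - ((t:Nat):Int) = ((t:Nat):Int) from by push_cast; ring]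
          obtain ⟨hq', hr'⟩ := qr_of n (g+1) t (rv n g)
            (by have hx : 2^g * qv n g = 2^(g+1)*t + 2^g := by rw [ht, h2s]; ring
                omega)
            (by omega)
          rw [addAt_pos _ _ _ (by simp [PySem.Dict.contains_modify, PySem.Dict.contains_insert, PySem.Dict.contains_insert_self, PySem.Dict.contains_empty])]
          rw [addAt_pos _ _ _ (by simp [PySem.Dict.contains_modify, PySem.Dict.contains_insert, PySem.Dict.contains_insert_self, PySem.Dict.contains_empty])]
          rw [addAt_neg _ _ _ (by simp [PySem.Dict.contains_modify, PySem.Dict.contains_insert, PySem.Dict.contains_insert_self, PySem.Dict.contains_empty])]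
          rw [addAt_neg _ _ _ (PySem.Dict.contains_empty _)]
          convert ih (g+1) _ hg' hfuel' ?_ ?_ ?_ using 2
          · push_cast; omega
          · rw [hq', hr', if_neg hr0]
            rw [PySem.Dict.keys_modify,
                PySem.Dict.keys_insert_of_contains _ _ (by
                  simp [PySem.Dict.contains_modify, PySem.Dict.contains_insert, PySem.Dict.contains_insert_self]),
                PySem.Dict.keys_modify,
                PySem.Dict.keys_insert_of_contains _ _ (by
                  simp [PySem.Dict.contains_insert, PySem.Dict.contains_insert_self]),
                PySem.Dict.keys_insert_of_not_contains _ _ (by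
                  simp [PySem.Dict.contains_insert, PySem.Dict.contains_empty]),
                PySem.Dict.keys_insert_of_not_contains _ _ (PySem.Dict.contains_empty _),
                PySem.Dict.keys_empty]
            simp only [List.nil_append]
            rw [show ((t:Nat):Int) + 1 = ((t+1:Nat):Int) from by push_cast; ring]
            exact PySem.List.sorted_rev_eq_of_perm_of_pairwise_gt _ _ _
              (List.Perm.swap _ _ _) (by simp)
          · rw [hq', hr']
            rw [show ((t:Nat):Int) + 1 = ((t+1:Nat):Int) from by push_cast; ring]
            rw [PySem.Dict.getD_modify, if_neg (show ¬ (((t+1:Nat):Int) = ((t:Nat):Int)) from by simp)]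
            rw [PySem.Dict.getD_modify, if_neg (show ¬ (((t+1:Nat):Int) = ((t:Nat):Int)) from by simp)]
            rw [PySem.Dict.getD_insert, if_pos rfl]
          · rw [hq', hr']
            rw [PySem.Dict.getD_modify, if_pos rfl]
            beta_reduce
            rw [PySem.Dict.getD_modify, if_pos rfl]
            beta_reduce
            rw [PySem.Dict.getD_insert, if_neg (show ¬ (((t:Nat):Int) = ((t+1:Nat):Int)) from by simp)]
            rw [PySem.Dict.getD_insert, if_pos rfl]
            push_cast; omega



-- ----- the same loop invariant for negative N (Int-valued level quotient/remainder) -----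

lemma tdiv2_mul (t : Int) : PySem.Int.truncdiv (2*t) 2 = t := by
  simp [PySem.Int.truncdiv]

lemma tdiv2_odd_neg (t : Int) (h : t < 0) : PySem.Int.truncdiv (2*t+1) 2 = t+1 := by
  have h1 : (2*t+1) = -(2*(-t-1)+1) := by ring
  rw [PySem.Int.truncdiv, h1, Int.neg_tdiv, Int.tdiv_eq_ediv_of_nonneg (by omega)]
  omega

lemma fd2_mul (t : Int) : PySem.Int.floordiv (2*t) 2 = t := by
  rw [PySem.Int.floordiv_eq_ediv_of_pos (by norm_num)]; omega

lemma fd2_odd (t : Int) : PySem.Int.floordiv (2*t+1) 2 = t := by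
  rw [PySem.Int.floordiv_eq_ediv_of_pos (by norm_num)]; omega

lemma tdiv2_odd_nonneg (t : Int) (h : 0 ≤ t) : PySem.Int.truncdiv (2*t+1) 2 = t := by
  rw [PySem.Int.truncdiv, Int.tdiv_eq_ediv_of_nonneg (by omega)]
  omega

-- A prints (max, min) of the truncating halves; B prints the floor halves high-first:
-- the same pair for every gap size
lemma pair_minmax (m : Int) :
    PySem.Int.toStr (max (PySem.Int.truncdiv m 2) (m - PySem.Int.truncdiv m 2)) ++ " " ++
      PySem.Int.toStr (min (PySem.Int.truncdiv m 2) (m - PySem.Int.truncdiv m 2))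
    = PySem.Int.toStr (m - PySem.Int.floordiv m 2) ++ " " ++
      PySem.Int.toStr (PySem.Int.floordiv m 2) := by
  rcases Int.even_or_odd m with ⟨t, ht⟩ | ⟨t, ht⟩
  · rw [show m = 2*t from by omega, tdiv2_mul, fd2_mul]
    rw [show 2*t - t = t from by ring, max_self, min_self]
  · rcases le_or_gt 0 t with h | h
    · rw [show m = 2*t+1 from by omega, tdiv2_odd_nonneg t h, fd2_odd]
      rw [show 2*t+1 - t = t+1 from by ring]
      rw [max_eq_right (by omega), min_eq_left (by omega)]
    · rw [show m = 2*t+1 from by omega, tdiv2_odd_neg t h, fd2_odd]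
      rw [show 2*t+1 - (t+1) = t from by ring, show 2*t+1 - t = t+1 from by ring]
      rw [max_eq_left (by omega), min_eq_right (by omega)]

-- K ≤ 0 behaves as the first person: A returns at the very first gap, B clamps K to 1
lemma solve_klo (N K : Int) (hK : K ≤ 0) (hN : N ≠ 0) : solve N K = solve_alt N K := by
  unfold solve
  rw [show K.toNat + 1 = 1 from by omega]
  simp only [solveLoop]
  rw [PySem.Dict.keys_insert_of_not_contains _ _ (PySem.Dict.contains_empty _), PySem.Dict.keys_empty]
  simp only [List.nil_append]
  rw [PySem.List.sorted_rev_eq_self_of_pairwise _ _ (by simp)]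
  simp only [solveInner]
  rw [if_neg hN]
  rw [PySem.Dict.getD_insert, if_pos rfl]
  rw [if_pos (show (0:Int) + 1 ≥ K from by omega)]
  simp only [solve_alt]
  rw [show max K 1 = (1:Int) from by omega]
  rw [show PySem.Int.bitLength (1:Int) - 1 = 0 from by decide]
  rw [show ((2:Int)^(0:Nat)) = 1 from by norm_num]
  have hfd : PySem.Int.floordiv (N - (1 - 1)) 1 = N := by norm_num
  have hmd : PySem.Int.mod (N - (1 - 1)) 1 = 0 := by norm_num
  rw [hfd, hmd, if_neg (show ¬ ((1:Int) - 1 < 0) from by omega)]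
  exact pair_minmax (N - 1)

lemma qrZ (M P a b : Int) (hP : 0 < P) (h : M = P * a + b) (hb0 : 0 ≤ b) (hbP : b < P) :
    PySem.Int.floordiv M P = a ∧ PySem.Int.mod M P = b := by
  have h1 : PySem.Int.floordiv M P = a := by
    rw [PySem.Int.floordiv_eq_iff_of_pos hP]
    constructor <;> nlinarith
  refine ⟨h1, ?_⟩
  have h2 := PySem.Int.floordiv_mul_add_mod M P
  rw [h1] at h2; nlinarith

lemma modZ_bounds (a P : Int) (hP : 0 < P) : 0 ≤ PySem.Int.mod a P ∧ PySem.Int.mod a P < P := by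
  rw [PySem.Int.mod_eq_emod_of_pos hP]
  exact ⟨Int.emod_nonneg _ (by omega), Int.emod_lt_of_pos _ hP⟩

-- solve_alt with its depth pinned to g
def altAt (g : Nat) (N K : Int) : String :=
  let w : Int := 2 ^ g
  let q := PySem.Int.floordiv (N - (w - 1)) w
  let r := PySem.Int.mod (N - (w - 1)) w
  let m := (if K - w < r then q + 1 else q) - 1
  PySem.Int.toStr (m - PySem.Int.floordiv m 2) ++ " " ++ PySem.Int.toStr (PySem.Int.floordiv m 2)

lemma alt_eq_altAt (n : Int) (k g : Nat) (hk : 1 ≤ k) (h1 : 2^g ≤ k) (h2 : k < 2^(g+1)) :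
    solve_alt n (k:Int) = altAt g n (k:Int) := by
  obtain ⟨b1, b2⟩ := bl_bounds k hk
  have hdg : PySem.Int.bitLength ((k:Nat):Int) - 1 = g := by
    by_contra hne
    rcases Nat.lt_or_ge (PySem.Int.bitLength ((k:Nat):Int) - 1) g with h | h
    · have := Nat.pow_le_pow_right (show 1 ≤ 2 by norm_num)
        (show PySem.Int.bitLength ((k:Nat):Int) - 1 + 1 ≤ g from by omega)
      omega
    · have := Nat.pow_le_pow_right (show 1 ≤ 2 by norm_num)
        (show g + 1 ≤ PySem.Int.bitLength ((k:Nat):Int) - 1 from by omega)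
      omega
  simp only [solve_alt, altAt]
  rw [show max ((k:Nat):Int) 1 = ((k:Nat):Int) from by omega]
  rw [hdg]

lemma loop_ok_neg (n : Int) (hn : n < 0) (k : Nat) (hk : 1 ≤ k) :
    ∀ (fuel g : Nat) (Dg : PySem.Dict Int Int),
      2^g ≤ k →
      PySem.Int.bitLength (k:Int) - 1 - g < fuel →
      PySem.List.sorted Dg.keys (fun x => x) true
        = (if PySem.Int.mod (n - ((2:Int)^g - 1)) ((2:Int)^g) = 0
           then [PySem.Int.floordiv (n - ((2:Int)^g - 1)) ((2:Int)^g)]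
           else [PySem.Int.floordiv (n - ((2:Int)^g - 1)) ((2:Int)^g) + 1,
                 PySem.Int.floordiv (n - ((2:Int)^g - 1)) ((2:Int)^g)]) →
      Dg.getD (PySem.Int.floordiv (n - ((2:Int)^g - 1)) ((2:Int)^g) + 1) 0
        = PySem.Int.mod (n - ((2:Int)^g - 1)) ((2:Int)^g) →
      Dg.getD (PySem.Int.floordiv (n - ((2:Int)^g - 1)) ((2:Int)^g)) 0
        = (2:Int)^g - PySem.Int.mod (n - ((2:Int)^g - 1)) ((2:Int)^g) →
      solveLoop (k : Int) fuel Dg ((2:Int)^g - 1) = solve_alt n (k : Int) := by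
  intro fuel
  induction fuel with
  | zero => intro g Dg _ hfuel _ _ _; exact absurd hfuel (Nat.not_lt_zero _)
  | succ fuel ih =>
    intro g Dg hg hfuel hsk hD1 hD0
    set Q := PySem.Int.floordiv (n - ((2:Int)^g - 1)) ((2:Int)^g) with hQdef
    set R := PySem.Int.mod (n - ((2:Int)^g - 1)) ((2:Int)^g) with hRdef
    have hwp : (0:Int) < 2^g := by positivity
    have hQR : Q * 2^g + R = n - ((2:Int)^g - 1) := PySem.Int.floordiv_mul_add_mod _ _
    obtain ⟨hR0, hRlt⟩ := modZ_bounds (n - ((2:Int)^g - 1)) ((2:Int)^g) hwp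
    rw [← hRdef] at hR0 hRlt
    have hMneg : n - ((2:Int)^g - 1) < 0 := by omega
    have hQneg : Q < 0 := by
      rw [hQdef, PySem.Int.floordiv_eq_ediv_of_pos hwp]
      exact Int.ediv_neg_of_neg_of_pos hMneg hwp
    have h2sN : (2:Nat)^(g+1) = 2*2^g := by ring
    have hgz : ((2:Int)^g) ≤ (k:Int) := by exact_mod_cast hg
    simp only [solveLoop, hsk]
    by_cases hret : k < 2^(g+1)
    · have hretz : (k:Int) < 2*(2:Int)^g := by exact_mod_cast (show k < 2*2^g from by omega)
      rw [alt_eq_altAt n k g hk hg hret]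
      simp only [altAt]
      rw [← hQdef, ← hRdef]
      by_cases hr0 : R = 0
      · rw [if_pos hr0]
        simp only [solveInner]
        rw [if_neg (show ¬ (Q = 0) from by omega)]
        rw [hD0]
        rw [if_pos (show ((2:Int)^g - 1) + ((2:Int)^g - R) ≥ (k:Int) from by omega)]
        rw [if_neg (show ¬ ((k:Int) - 2^g < R) from by omega)]
        rcases Int.even_or_odd Q with ⟨t, ht⟩ | ⟨t, ht⟩
        · -- Q = 2t: Q-1 = 2(t-1)+1 is odd and negative
          rw [show Q - 1 = 2*(t-1)+1 from by omega]
          rw [tdiv2_odd_neg (t-1) (by omega), fd2_odd]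
          rw [show 2*(t-1)+1 - (t-1+1) = t - 1 + 1 - 1 from by ring]
          rw [show 2*(t-1)+1 - (t-1) = t - 1 + 1 from by ring]
          rw [max_eq_left (by omega), min_eq_right (by omega)]
          rw [show t - 1 + 1 - 1 = t - 1 from by ring]
        · -- Q = 2t+1: Q-1 = 2t
          rw [show Q - 1 = 2*t from by omega]
          rw [tdiv2_mul, fd2_mul]
          rw [show 2*t - t = t from by ring, max_self, min_self]
      · rw [if_neg hr0]
        simp only [solveInner]
        rw [if_neg (show ¬ (Q + 1 = 0) from by
              intro h
              rw [show Q = -1 from by omega] at hQR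
              omega)]
        rw [hD1]
        by_cases hc : (k:Int) ≤ 2^g - 1 + R
        · rw [if_pos (show ((2:Int)^g - 1) + R ≥ (k:Int) from by omega)]
          rw [if_pos (show (k:Int) - 2^g < R from by omega)]
          rw [show Q + 1 - 1 = Q from by ring]
          rcases Int.even_or_odd Q with ⟨t, ht⟩ | ⟨t, ht⟩
          · rw [show Q = 2*t from by omega]
            rw [tdiv2_mul, fd2_mul]
            rw [show 2*t - t = t from by ring, max_self, min_self]
          · rw [ht, tdiv2_odd_neg t (by omega), fd2_odd]
            rw [show 2*t+1 - (t+1) = t from by ring]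
            rw [show 2*t+1 - t = t + 1 from by ring]
            rw [max_eq_left (by omega), min_eq_right (by omega)]
        · rw [if_neg (show ¬ (((2:Int)^g - 1) + R ≥ (k:Int)) from by omega)]
          rw [if_neg (show ¬ (Q = 0) from by omega)]
          rw [hD0]
          rw [if_pos (show (((2:Int)^g - 1) + R) + ((2:Int)^g - R) ≥ (k:Int) from by omega)]
          rw [if_neg (show ¬ ((k:Int) - 2^g < R) from by omega)]
          rcases Int.even_or_odd Q with ⟨t, ht⟩ | ⟨t, ht⟩
          · rw [show Q - 1 = 2*(t-1)+1 from by omega]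
            rw [tdiv2_odd_neg (t-1) (by omega), fd2_odd]
            rw [show 2*(t-1)+1 - (t-1+1) = t - 1 + 1 - 1 from by ring]
            rw [show 2*(t-1)+1 - (t-1) = t - 1 + 1 from by ring]
            rw [max_eq_left (by omega), min_eq_right (by omega)]
            rw [show t - 1 + 1 - 1 = t - 1 from by ring]
          · rw [show Q - 1 = 2*t from by omega]
            rw [tdiv2_mul, fd2_mul]
            rw [show 2*t - t = t from by ring, max_self, min_self]
    · -- no return in this generation
      have hd1 : g + 1 ≤ PySem.Int.bitLength (k:Int) - 1 := by
        obtain ⟨b1, b2⟩ := bl_bounds k hk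
        by_contra h
        have := Nat.pow_le_pow_right (show 1 ≤ 2 by norm_num)
          (show PySem.Int.bitLength (k:Int) - 1 + 1 ≤ g + 1 from by omega)
        omega
      have hfuel' : PySem.Int.bitLength (k:Int) - 1 - (g+1) < fuel := by omega
      have hg' : 2^(g+1) ≤ k := by omega
      have hgz' : 2*(2:Int)^g ≤ (k:Int) := by exact_mod_cast (show 2*2^g ≤ k from by omega)
      have hM' : n - ((2:Int)^(g+1) - 1) = (n - ((2:Int)^g - 1)) - 2^g := by ring
      by_cases hr0 : R = 0
      · rw [if_pos hr0]
        simp only [solveInner]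
        rw [if_neg (show ¬ (Q = 0) from by omega)]
        rw [hD0]
        rw [if_neg (show ¬ (((2:Int)^g - 1) + ((2:Int)^g - R) ≥ (k:Int)) from by omega)]
        change solveLoop _ _ _ _ = _
        rcases Int.even_or_odd Q with ⟨t, ht⟩ | ⟨t, ht⟩
        · -- children t and t-1
          rw [show Q - 1 = 2*(t-1)+1 from by omega]
          rw [tdiv2_odd_neg (t-1) (by omega)]
          rw [show 2*(t-1)+1 - (t-1+1) = t - 1 from by ring]
          rw [show t - 1 + 1 = t from by ring]
          obtain ⟨hfd', hmd'⟩ := qrZ (n - ((2:Int)^(g+1) - 1)) ((2:Int)^(g+1)) (t-1) ((2:Int)^g)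
            (by positivity) (by rw [hr0] at hQR; rw [show Q = 2*t from by omega] at hQR
                                linear_combination -hQR)
            (by omega) (by have : (2:Int)^(g+1) = 2*2^g := by ring
                           omega)
          rw [addAt_neg _ _ _ (by simp [PySem.Dict.contains_insert, PySem.Dict.contains_empty] <;> omega)]
          rw [addAt_neg _ _ _ (PySem.Dict.contains_empty _)]
          convert ih (g+1) _ hg' hfuel' ?_ ?_ ?_ using 2
          · have : (2:Int)^(g+1) = 2*2^g := by ring
            omega
          · rw [hfd', hmd', if_neg (show ¬ ((2:Int)^g = 0) from by omega)]
            rw [PySem.Dict.keys_insert_of_not_contains _ _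
                  (by simp [PySem.Dict.contains_insert, PySem.Dict.contains_empty] <;> omega)]
            rw [PySem.Dict.keys_insert_of_not_contains _ _ (PySem.Dict.contains_empty _)]
            rw [PySem.Dict.keys_empty]
            simp only [List.nil_append]
            rw [show t - 1 + 1 = t from by ring]
            exact PySem.List.sorted_rev_eq_self_of_pairwise _ _ (by simp <;> omega)
          · rw [hfd', hmd']
            rw [show t - 1 + 1 = t from by ring]
            rw [PySem.Dict.getD_insert, if_neg (by omega), PySem.Dict.getD_insert, if_pos rfl]
            omega
          · rw [hfd', hmd']
            rw [PySem.Dict.getD_insert, if_pos rfl]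
            have : (2:Int)^(g+1) = 2*2^g := by ring
            omega
        · -- Q = 2t+1: both children t
          rw [show Q - 1 = 2*t from by omega]
          rw [tdiv2_mul]
          rw [show 2*t - t = t from by ring]
          obtain ⟨hfd', hmd'⟩ := qrZ (n - ((2:Int)^(g+1) - 1)) ((2:Int)^(g+1)) t 0
            (by positivity) (by rw [hr0] at hQR; rw [ht] at hQR
                                linear_combination -hQR)
            (by omega) (by positivity)
          rw [addAt_pos _ _ _ (by simp [PySem.Dict.contains_modify, PySem.Dict.contains_insert,
                PySem.Dict.contains_insert_self, PySem.Dict.contains_empty])]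
          rw [addAt_neg _ _ _ (PySem.Dict.contains_empty _)]
          convert ih (g+1) _ hg' hfuel' ?_ ?_ ?_ using 2
          · have : (2:Int)^(g+1) = 2*2^g := by ring
            omega
          · rw [hfd', hmd', if_pos rfl]
            rw [PySem.Dict.keys_modify,
                PySem.Dict.keys_insert_of_contains _ _ (PySem.Dict.contains_insert_self _ _ _),
                PySem.Dict.keys_insert_of_not_contains _ _ (PySem.Dict.contains_empty _),
                PySem.Dict.keys_empty]
            exact PySem.List.sorted_rev_eq_self_of_pairwise _ _ (by simp)
          · rw [hfd', hmd']
            rw [PySem.Dict.getD_modify, if_neg (by omega)]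
            rw [PySem.Dict.getD_insert, if_neg (by omega), PySem.Dict.getD_empty]
          · rw [hfd', hmd']
            rw [PySem.Dict.getD_modify, if_pos rfl]
            beta_reduce
            rw [PySem.Dict.getD_insert, if_pos rfl]
            have : (2:Int)^(g+1) = 2*2^g := by ring
            omega
      · rw [if_neg hr0]
        simp only [solveInner]
        rw [if_neg (show ¬ (Q + 1 = 0) from by
              intro h
              rw [show Q = -1 from by omega] at hQR
              omega)]
        rw [hD1]
        rw [if_neg (show ¬ (((2:Int)^g - 1) + R ≥ (k:Int)) from by omega)]
        rw [if_neg (show ¬ (Q = 0) from by omega)]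
        rw [hD0]
        rw [if_neg (show ¬ ((((2:Int)^g - 1) + R) + ((2:Int)^g - R) ≥ (k:Int)) from by omega)]
        change solveLoop _ _ _ _ = _
        rcases Int.even_or_odd Q with ⟨t, ht⟩ | ⟨t, ht⟩
        · -- parent Q+1=2t+1: children t,t ; parent Q=2t: children t,t-1
          rw [show Q + 1 - 1 = 2*t from by omega]
          rw [show Q - 1 = 2*(t-1)+1 from by omega]
          rw [tdiv2_mul, tdiv2_odd_neg (t-1) (by omega)]
          rw [show 2*t - t = t from by ring]
          rw [show 2*(t-1)+1 - (t-1+1) = t - 1 from by ring]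
          rw [show t - 1 + 1 = t from by ring]
          obtain ⟨hfd', hmd'⟩ := qrZ (n - ((2:Int)^(g+1) - 1)) ((2:Int)^(g+1)) (t-1) ((2:Int)^g + R)
            (by positivity) (by rw [show Q = 2*t from by omega] at hQR
                                linear_combination -hQR)
            (by omega) (by have : (2:Int)^(g+1) = 2*2^g := by ring
                           omega)
          rw [addAt_neg _ _ _ (by simp [PySem.Dict.contains_modify, PySem.Dict.contains_insert,
                PySem.Dict.contains_empty] <;> omega)]
          rw [addAt_pos _ _ _ (by simp [PySem.Dict.contains_modify, PySem.Dict.contains_insert,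
                PySem.Dict.contains_insert_self, PySem.Dict.contains_empty])]
          rw [addAt_pos _ _ _ (by simp [PySem.Dict.contains_insert_self, PySem.Dict.contains_empty])]
          rw [addAt_neg _ _ _ (PySem.Dict.contains_empty _)]
          convert ih (g+1) _ hg' hfuel' ?_ ?_ ?_ using 2
          · ring
          · rw [hfd', hmd', if_neg (show ¬ ((2:Int)^g + R = 0) from by omega)]
            rw [PySem.Dict.keys_insert_of_not_contains _ _
                  (by simp [PySem.Dict.contains_modify, PySem.Dict.contains_insert,
                        PySem.Dict.contains_insert_self, PySem.Dict.contains_empty] <;> omega)]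
            rw [PySem.Dict.keys_modify,
                PySem.Dict.keys_insert_of_contains _ _ (by
                  simp [PySem.Dict.contains_modify, PySem.Dict.contains_insert_self]),
                PySem.Dict.keys_modify,
                PySem.Dict.keys_insert_of_contains _ _ (PySem.Dict.contains_insert_self _ _ _),
                PySem.Dict.keys_insert_of_not_contains _ _ (PySem.Dict.contains_empty _),
                PySem.Dict.keys_empty]
            simp only [List.nil_append]
            rw [show t - 1 + 1 = t from by ring]
            exact PySem.List.sorted_rev_eq_self_of_pairwise _ _ (by simp <;> omega)
          · rw [hfd', hmd']
            rw [show t - 1 + 1 = t from by ring]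
            rw [PySem.Dict.getD_insert, if_neg (by omega)]
            rw [PySem.Dict.getD_modify, if_pos rfl]
            beta_reduce
            rw [PySem.Dict.getD_modify, if_pos rfl]
            beta_reduce
            rw [PySem.Dict.getD_insert, if_pos rfl]
            ring
          · rw [hfd', hmd']
            rw [PySem.Dict.getD_insert, if_pos rfl]
            have : (2:Int)^(g+1) = 2*2^g := by ring
            omega
        · -- parent Q+1=2t+2: children t+1,t ; parent Q=2t+1: children t,t
          rw [show Q + 1 - 1 = 2*t+1 from by omega]
          rw [show Q - 1 = 2*t from by omega]
          rw [tdiv2_odd_neg t (by omega), tdiv2_mul]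
          rw [show 2*t+1 - (t+1) = t from by ring]
          rw [show 2*t - t = t from by ring]
          obtain ⟨hfd', hmd'⟩ := qrZ (n - ((2:Int)^(g+1) - 1)) ((2:Int)^(g+1)) t R
            (by positivity) (by rw [ht] at hQR
                                linear_combination -hQR)
            (by omega) (by have : (2:Int)^(g+1) = 2*2^g := by ring
                           omega)
          rw [addAt_pos _ _ _ (by simp [PySem.Dict.contains_modify, PySem.Dict.contains_insert,
                PySem.Dict.contains_insert_self, PySem.Dict.contains_empty])]
          rw [addAt_pos _ _ _ (by simp [PySem.Dict.contains_modify, PySem.Dict.contains_insert,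
                PySem.Dict.contains_insert_self, PySem.Dict.contains_empty] <;> omega)]
          rw [addAt_neg _ _ _ (by simp [PySem.Dict.contains_modify, PySem.Dict.contains_insert,
                PySem.Dict.contains_empty] <;> omega)]
          rw [addAt_neg _ _ _ (PySem.Dict.contains_empty _)]
          convert ih (g+1) _ hg' hfuel' ?_ ?_ ?_ using 2
          · ring
          · rw [hfd', hmd', if_neg hr0]
            rw [PySem.Dict.keys_modify,
                PySem.Dict.keys_insert_of_contains _ _ (by
                  simp [PySem.Dict.contains_modify, PySem.Dict.contains_insert,
                    PySem.Dict.contains_insert_self, PySem.Dict.contains_empty]),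
                PySem.Dict.keys_modify,
                PySem.Dict.keys_insert_of_contains _ _ (by
                  simp [PySem.Dict.contains_modify, PySem.Dict.contains_insert, PySem.Dict.contains_insert_self,
                    PySem.Dict.contains_empty] <;> omega),
                PySem.Dict.keys_insert_of_not_contains _ _ (by
                  simp [PySem.Dict.contains_modify, PySem.Dict.contains_insert, PySem.Dict.contains_empty] <;> omega),
                PySem.Dict.keys_insert_of_not_contains _ _ (PySem.Dict.contains_empty _),
                PySem.Dict.keys_empty]
            simp only [List.nil_append]
            exact PySem.List.sorted_rev_eq_self_of_pairwise _ _ (by simp)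
          · rw [hfd', hmd']
            rw [PySem.Dict.getD_modify, if_neg (by omega)]
            rw [PySem.Dict.getD_modify, if_neg (by omega)]
            rw [PySem.Dict.getD_insert, if_neg (by omega)]
            rw [PySem.Dict.getD_insert, if_pos rfl]
          · rw [hfd', hmd']
            rw [PySem.Dict.getD_modify, if_pos rfl]
            beta_reduce
            rw [PySem.Dict.getD_modify, if_pos rfl]
            beta_reduce
            rw [PySem.Dict.getD_insert, if_pos rfl]
            have : (2:Int)^(g+1) = 2*2^g := by ring
            omega

-- ===== VERDICT (by name: the statement is the Claim_ definition above) =====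
theorem solve_spec : Claim_equal_solve := by
  intro N K _ hpre
  unfold Spec_solve
  obtain ⟨hN0, hKN⟩ := hpre
  rcases le_or_gt K 0 with hK0 | hKpos
  · exact solve_klo N K hK0 hN0
  · obtain ⟨kk, rfl⟩ : ∃ kk : Nat, K = (kk:Int) := ⟨K.toNat, by omega⟩
    have hk : 1 ≤ kk := by exact_mod_cast hKpos
    have hfuelTop : PySem.Int.bitLength ((kk:Nat):Int) - 1 - 0 < kk + 1 := by
      obtain ⟨b1, b2⟩ := bl_bounds kk hk
      have h2 := Nat.lt_two_pow_self (n := PySem.Int.bitLength ((kk:Nat):Int) - 1)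
      omega
    rcases lt_or_ge N 0 with hNneg | hNpos
    · -- N < 0 (any K ≥ 1)
      unfold solve
      rw [show ((kk:Int)).toNat + 1 = kk + 1 from by simp]
      have hfd0 : PySem.Int.floordiv (N - ((2:Int)^0 - 1)) ((2:Int)^0) = N := by
        norm_num
      have hmd0 : PySem.Int.mod (N - ((2:Int)^0 - 1)) ((2:Int)^0) = 0 := by
        norm_num
      rw [show (0:Int) = (2:Int)^0 - 1 from by norm_num]
      apply loop_ok_neg N hNneg kk hk (kk+1) 0
      · simpa using hk
      · exact hfuelTop
      · rw [hfd0, hmd0, if_pos rfl]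
        rw [PySem.Dict.keys_insert_of_not_contains _ _ (PySem.Dict.contains_empty _), PySem.Dict.keys_empty]
        exact PySem.List.sorted_rev_eq_self_of_pairwise _ _ (by simp)
      · rw [hfd0, hmd0, PySem.Dict.getD_insert, if_neg (by omega), PySem.Dict.getD_empty]
      · rw [hfd0, hmd0, PySem.Dict.getD_insert, if_pos rfl]
        norm_num
    · -- 1 ≤ K ≤ N
      have hKN' : (kk:Int) ≤ N := by
        rcases hKN with h | h
        · omega
        · exact h
      obtain ⟨n, rfl⟩ : ∃ n : Nat, N = (n:Int) := ⟨N.toNat, by omega⟩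
      have hkn : kk ≤ n := by exact_mod_cast hKN'
      unfold solve
      rw [show ((kk:Int)).toNat + 1 = kk + 1 from by simp]
      have hq0 : qv n 0 = n := by unfold qv Mv; simp
      have hr0 : rv n 0 = 0 := by unfold rv Mv; simp [Nat.mod_one]
      have hk00 : (0:Int) = ((2^0 : Nat) : Int) - 1 := by norm_num
      rw [hk00]
      apply loop_ok n kk hk hkn (kk+1) 0
      · simpa using hk
      · exact hfuelTop
      · rw [hq0, hr0, if_pos rfl]
        rw [PySem.Dict.keys_insert_of_not_contains _ _ (PySem.Dict.contains_empty _), PySem.Dict.keys_empty]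
        exact PySem.List.sorted_rev_eq_self_of_pairwise _ _ (by simp)
      · rw [hq0, hr0, PySem.Dict.getD_insert, if_neg (by omega), PySem.Dict.getD_empty]
        simp
      · rw [hq0, hr0, PySem.Dict.getD_insert, if_pos rfl]
        simp
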